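-- pv_equiv track=rewrite | github.com/Ikerlb/aoc2024 | 9/sol2.py | get_space_target_index
-- ===== SOURCE A (Python) =====
-- def get_space_target_index(s, need, target):
--     si = ti = None
--     for i, (t, c) in enumerate(s):
--         if si is None and ti is None and t is None and c >= need:
--             si = i
--         if t == target:
--             ti = i
--     return si, ti
-- ===== SOURCE B (Python) =====
-- def get_space_target_index(s, need, target):
--     n = len(s)
--     first_t = next((i for i, (t, c) in enumerate(s) if t == target), n)
--     si = next((i for i, (t, c) in enumerate(s)
--                if t is None and c >= need and i <= first_t), None)
--     ti = next((i for i in range(n - 1, -1, -1) if s[i][0] == target), None)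
--     return si, ti
-- ===== Notes on version B (the rewrite author's own statement) =====
-- stated objective: alternative
-- what changed: Replaces the single coupled stateful pass by three independent scans: the first-target boundary, a forward search for the first fitting free slot bounded by that boundary, and a reverse scan for the last target occurrence.
import Mathlib
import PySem

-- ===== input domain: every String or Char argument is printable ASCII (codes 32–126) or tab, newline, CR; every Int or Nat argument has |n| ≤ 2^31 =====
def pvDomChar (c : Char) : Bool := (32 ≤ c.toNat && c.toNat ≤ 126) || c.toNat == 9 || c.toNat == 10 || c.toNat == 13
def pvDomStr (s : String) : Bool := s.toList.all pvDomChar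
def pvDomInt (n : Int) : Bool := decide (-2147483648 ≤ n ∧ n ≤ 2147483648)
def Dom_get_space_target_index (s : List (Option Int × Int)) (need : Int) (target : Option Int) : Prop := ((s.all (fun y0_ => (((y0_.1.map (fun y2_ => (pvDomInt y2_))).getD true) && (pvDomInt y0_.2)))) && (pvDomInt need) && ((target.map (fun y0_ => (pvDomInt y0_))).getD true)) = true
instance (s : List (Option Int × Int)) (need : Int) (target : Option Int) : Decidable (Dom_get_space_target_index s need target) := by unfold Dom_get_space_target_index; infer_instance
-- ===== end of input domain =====

-- B replaces A's single coupled stateful pass by a boundary computation plus two independent scans (alternative decomposition, same cost).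


-- ===== PORT A =====
-- A's for-loop over enumerate(s) carrying the state (si, ti) and the running index i
def pvLoopA : List (Option Int × Int) → Int → Option Int → Nat → Option Int → Option Int → Option Int × Option Int
  | [], _, _, _, si, ti => (si, ti)
  | (t, c) :: rest, need, target, i, si, ti =>
      let si' := if si = none ∧ ti = none ∧ t = none ∧ c ≥ need then some (i : Int) else si
      let ti' := if t = target then some (i : Int) else ti
      pvLoopA rest need target (i + 1) si' ti'

def get_space_target_index (s : List (Option Int × Int)) (need : Int) (target : Option Int) : Option Int × Option Int :=
  pvLoopA s need target 0 none none

-- ===== PORT B =====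
-- first_t = next((i for i,(t,c) in enumerate(s) if t == target), n): forward scan, default = length reached
def pvFirstT : List (Option Int × Int) → Option Int → Nat → Nat
  | [], _, k => k
  | (t, _) :: rest, target, k => if t = target then k else pvFirstT rest target (k + 1)

-- si = next((i for i,(t,c) in enumerate(s) if t is None and c >= need and i <= first_t), None)
def pvSi : List (Option Int × Int) → Int → Nat → Nat → Option Int
  | [], _, _, _ => none
  | (t, c) :: rest, need, bound, k =>
      if t = none ∧ c ≥ need ∧ k ≤ bound then some (k : Int) else pvSi rest need bound (k + 1)

-- ti = next((i for i in range(n-1,-1,-1) if s[i][0] == target), None): search from the back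
def pvTi : List (Option Int × Int) → Option Int → Nat → Option Int
  | [], _, _ => none
  | (t, _) :: rest, target, k =>
      match pvTi rest target (k + 1) with
      | some i => some i
      | none => if t = target then some (k : Int) else none

def get_space_target_index_alt (s : List (Option Int × Int)) (need : Int) (target : Option Int) : Option Int × Option Int :=
  let firstT := pvFirstT s target 0
  (pvSi s need firstT 0, pvTi s target 0)

-- ===== PRECONDITION & SPEC =====
def Spec_get_space_target_index (s : List (Option Int × Int)) (need : Int) (target : Option Int) (out : Option Int × Option Int) : Prop := out = get_space_target_index_alt s need target
instance (s : List (Option Int × Int)) (need : Int) (target : Option Int) (out : Option Int × Option Int) : Decidable (Spec_get_space_target_index s need target out) := by unfold Spec_get_space_target_index; infer_instance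

-- ===== CLAIM (what is proved, stated in full; the proofs are below) =====
def Claim_equal_get_space_target_index : Prop := ∀ (s : List (Option Int × Int)) (need : Int) (target : Option Int), Dom_get_space_target_index s need target → Spec_get_space_target_index s need target (get_space_target_index s need target)

-- ===== LEMMAS AND PROOFS =====

-- the boundary is at least the start index
theorem le_pvFirstT (s : List (Option Int × Int)) (target : Option Int) (k : Nat) :
    k ≤ pvFirstT s target k := by
  induction s generalizing k with
  | nil => simp [pvFirstT]
  | cons hd tl ih =>
      obtain ⟨t, c⟩ := hd
      simp only [pvFirstT]
      split
      · exact le_refl k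
      · exact Nat.le_trans (Nat.le_succ k) (ih (k + 1))

-- once every index exceeds the bound, the bounded search fails
theorem pvSi_none_of_lt (s : List (Option Int × Int)) (need : Int) (bound k : Nat)
    (h : bound < k) : pvSi s need bound k = none := by
  induction s generalizing k with
  | nil => simp [pvSi]
  | cons hd tl ih =>
      obtain ⟨t, c⟩ := hd
      simp only [pvSi]
      rw [if_neg, ih (k + 1) (Nat.lt_succ_of_lt h)]
      rintro ⟨-, -, hk⟩
      omega

-- once si or ti is set, si is frozen
theorem pvLoopA_fst_frozen (s : List (Option Int × Int)) (need : Int) (target : Option Int)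
    (k : Nat) (si ti : Option Int) (h : si ≠ none ∨ ti ≠ none) :
    (pvLoopA s need target k si ti).1 = si := by
  induction s generalizing k ti with
  | nil => simp [pvLoopA]
  | cons hd tl ih =>
      obtain ⟨t, c⟩ := hd
      simp only [pvLoopA]
      have hsi : (if si = none ∧ ti = none ∧ t = none ∧ c ≥ need then some (k : Int) else si) = si := by
        rcases h with h | h
        · rw [if_neg]; rintro ⟨h1, -⟩; exact h h1
        · rw [if_neg]; rintro ⟨-, h2, -⟩; exact h h2
      rw [hsi]
      apply ih
      rcases h with h | h
      · exact Or.inl h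
      · right
        split
        · simp
        · exact h

-- A's ti component is the last occurrence (B's back-to-front search), falling back to the accumulator
theorem pvLoopA_snd (s : List (Option Int × Int)) (need : Int) (target : Option Int)
    (k : Nat) (si ti : Option Int) :
    (pvLoopA s need target k si ti).2 =
      (match pvTi s target k with
       | some i => some i
       | none => ti) := by
  induction s generalizing k si ti with
  | nil => simp [pvLoopA, pvTi]
  | cons hd tl ih =>
      obtain ⟨t, c⟩ := hd
      simp only [pvLoopA, pvTi]
      rw [ih]
      cases pvTi tl target (k + 1) with
      | some i => simp
      | none =>
          simp only
          split <;> simp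

-- main invariant: from the empty state, A's loop from index k computes B's three scans from index k
theorem pvLoopA_eq (s : List (Option Int × Int)) (need : Int) (target : Option Int) (k : Nat) :
    pvLoopA s need target k none none =
      (pvSi s need (pvFirstT s target k) k, pvTi s target k) := by
  induction s generalizing k with
  | nil => simp [pvLoopA, pvSi, pvTi]
  | cons hd tl ih =>
      obtain ⟨t, c⟩ := hd
      have hL : pvLoopA ((t, c) :: tl) need target k none none
          = pvLoopA tl need target (k + 1)
              (if t = none ∧ c ≥ need then some (k : Int) else none)
              (if t = target then some (k : Int) else none) := by
        simp [pvLoopA]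
      by_cases ht : t = target
      · -- head is the first target: boundary = k, ti set here, si frozen afterwards
        subst ht
        have hF : pvFirstT ((t, c) :: tl) t k = k := by simp [pvFirstT]
        rw [hL, hF]
        apply Prod.ext
        · rw [pvLoopA_fst_frozen _ _ _ _ _ _ (Or.inr (by simp))]
          show _ = pvSi ((t, c) :: tl) need k k
          simp only [pvSi]
          rw [pvSi_none_of_lt tl need k (k + 1) (Nat.lt_succ_self k)]
          split_ifs with h1 h2 <;> first | rfl | (exfalso; tauto)
        · rw [pvLoopA_snd]
          show _ = pvTi ((t, c) :: tl) t k
          simp only [pvTi]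
      · -- head is not a target: the boundary passes to the tail
        have hF : pvFirstT ((t, c) :: tl) target k = pvFirstT tl target (k + 1) := by
          simp [pvFirstT, ht]
        have hT : pvTi ((t, c) :: tl) target k = pvTi tl target (k + 1) := by
          simp only [pvTi, if_neg ht]
          cases pvTi tl target (k + 1) <;> rfl
        rw [hL, hF, hT, if_neg ht]
        by_cases hfit : t = none ∧ c ≥ need
        · -- fitting free slot at k: si = some k on both sides
          rw [if_pos hfit]
          apply Prod.ext
          · rw [pvLoopA_fst_frozen _ _ _ _ _ _ (Or.inl (by simp))]
            show _ = pvSi ((t, c) :: tl) need (pvFirstT tl target (k + 1)) k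
            simp only [pvSi]
            rw [if_pos ⟨hfit.1, hfit.2,
              Nat.le_trans (Nat.le_succ k) (le_pvFirstT tl target (k + 1))⟩]
          · rw [pvLoopA_snd]
            cases pvTi tl target (k + 1) <;> rfl
        · -- nothing happens at k: recurse
          rw [if_neg hfit, ih (k + 1)]
          show _ = (pvSi ((t, c) :: tl) need (pvFirstT tl target (k + 1)) k, _)
          simp only [pvSi]
          rw [if_neg (by rintro ⟨h1, h2, -⟩; exact hfit ⟨h1, h2⟩)]

-- ===== VERDICT (by name: the statement is the Claim_ definition above) =====
theorem get_space_target_index_spec : Claim_equal_get_space_target_index := by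
  intro s need target _
  unfold Spec_get_space_target_index get_space_target_index get_space_target_index_alt
  exact pvLoopA_eq s need target 0
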